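-- pv_equiv track=rewrite | github.com/PranayS676/agentic-job-agents | apps/agent-runtime/src/job_agent_runtime/agents/research_agent.py | _cloud_score
-- ===== SOURCE A (Python) =====
-- def _cloud_score(required_clouds: list[str], track_keywords: set[str]) -> int:
--     if not required_clouds:
--         return 0
--     score = 0
--     for cloud in required_clouds:
--         if cloud in track_keywords:
--             score += 8
--         else:
--             score -= 6
--     return score
-- ===== SOURCE B (Python) =====
-- def _cloud_score(required_clouds: list[str], track_keywords: set[str]) -> int:
--     # Stage 1: aggregate duplicates into a multiplicity table.
--     counts = {}
--     for cloud in required_clouds: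
--         counts[cloud] = counts.get(cloud, 0) + 1
--     # Stage 2: one membership test per DISTINCT cloud, weighted by multiplicity.
--     hits = 0
--     for cloud, n in counts.items():
--         if cloud in track_keywords:
--             hits += n
--     # Stage 3: closed-form score.
--     return 14 * hits - 6 * len(required_clouds)
-- ===== Notes on version B (the rewrite author's own statement) =====
-- stated objective: alternative
-- what changed: Instead of A's per-element +8/-6 accumulation, B first aggregates the list into a multiplicity dict, then does one membership test per distinct cloud summing multiplicities of hits, and finally applies the closed form 14*hits - 6*len; membership tests drop from one per element to one per distinct element.
import Mathlib
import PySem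

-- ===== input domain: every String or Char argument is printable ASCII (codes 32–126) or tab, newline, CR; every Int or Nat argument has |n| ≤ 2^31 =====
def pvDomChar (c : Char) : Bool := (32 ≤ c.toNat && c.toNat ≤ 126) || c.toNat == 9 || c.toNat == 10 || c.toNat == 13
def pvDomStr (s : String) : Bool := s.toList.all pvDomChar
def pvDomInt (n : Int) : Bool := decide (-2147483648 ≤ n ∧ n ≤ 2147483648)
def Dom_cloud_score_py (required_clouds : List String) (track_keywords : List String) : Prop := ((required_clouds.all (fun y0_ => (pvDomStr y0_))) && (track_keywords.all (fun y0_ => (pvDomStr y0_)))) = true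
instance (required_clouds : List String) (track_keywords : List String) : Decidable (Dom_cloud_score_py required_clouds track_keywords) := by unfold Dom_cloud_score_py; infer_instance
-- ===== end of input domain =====

-- B replaces A's per-element +8/-6 accumulation by a multiplicity-dict aggregation, a membership pass over the distinct clouds, and the closed form 14*hits - 6*len (objective: alternative).


-- ===== PORT A =====
-- Port of A: early return on empty, then a fold accumulating +8 / -6 per element.
def cloud_score_py (required_clouds : List String) (track_keywords : List String) : Int :=
  if required_clouds = [] then 0
  else required_clouds.foldl (fun score cloud =>
    if track_keywords.contains cloud then score + 8 else score - 6) 0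

-- ===== PORT B =====
-- Port of B: build the multiplicity dict, fold over its items adding multiplicities of member keys, then 14*hits - 6*len.
def cloud_score_py_alt (required_clouds : List String) (track_keywords : List String) : Int :=
  let counts : PySem.Dict String Int :=
    required_clouds.foldl (fun d c => d.insert c (d.getD c 0 + 1)) PySem.Dict.empty
  let hits : Int :=
    counts.items.foldl (fun acc p => if track_keywords.contains p.1 then acc + p.2 else acc) 0
  14 * hits - 6 * required_clouds.length

-- ===== PRECONDITION & SPEC =====
def Spec_cloud_score_py (required_clouds : List String) (track_keywords : List String) (out : Int) : Prop := out = cloud_score_py_alt required_clouds track_keywords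
instance (required_clouds : List String) (track_keywords : List String) (out : Int) : Decidable (Spec_cloud_score_py required_clouds track_keywords out) := by unfold Spec_cloud_score_py; infer_instance

-- ===== CLAIM (what is proved, stated in full; the proofs are below) =====
def Claim_equal_cloud_score_py : Prop := ∀ (required_clouds : List String) (track_keywords : List String), Dom_cloud_score_py required_clouds track_keywords → Spec_cloud_score_py required_clouds track_keywords (cloud_score_py required_clouds track_keywords)

-- ===== LEMMAS AND PROOFS =====

-- A's fold in closed form: signed accumulation = 14 * (#matches) - 6 * length, shifted by the start value.
theorem pv_fold_shift (tk : List String) (rc : List String) (s : Int) :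
    rc.foldl (fun score cloud => if tk.contains cloud then score + 8 else score - 6) s
      = s + 14 * ((rc.countP (fun c => tk.contains c)) : Int) - 6 * rc.length := by
  induction rc generalizing s with
  | nil => simp
  | cons h t ih =>
    rw [List.foldl_cons, List.countP_cons]
    by_cases hm : tk.contains h
    · rw [if_pos hm, ih]; simp only [hm, if_true]; push_cast [List.length_cons]; ring
    · rw [if_neg hm, ih]; simp only [hm]; push_cast [List.length_cons]; ring

-- B's hits: the multiplicity-weighted sum over the distinct member clouds equals the plain match count.
theorem pv_hits_eq (tk rc : List String) :
    (((PySem.Set.ofList rc).filter (fun c => tk.contains c)).map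
        (fun k => ((rc.count k : Nat) : Int))).sum
      = ((rc.countP (fun c => tk.contains c)) : Int) := by
  have hperm : (PySem.Set.ofList rc).Perm rc.dedup := by
    rw [List.perm_ext_iff_of_nodup (PySem.Set.nodup_ofList rc) rc.nodup_dedup]
    intro a
    simp [PySem.Set.mem_ofList]
  have := (((hperm.filter (fun c => tk.contains c)).map
      (fun k => ((rc.count k : Nat) : Int))).sum_eq)
  rw [this]
  rw [← List.sum_map_count_dedup_filter_eq_countP (fun c => tk.contains c) rc]
  push_cast
  rw [List.map_map]
  rfl

-- ===== VERDICT (by name: the statement is the Claim_ definition above) =====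
theorem cloud_score_py_spec : Claim_equal_cloud_score_py := by
  intro rc tk _
  unfold Spec_cloud_score_py cloud_score_py cloud_score_py_alt
  simp only [PySem.Dict.foldl_insert_getD_add_one_eq_counter, PySem.Dict.items_counter]
  rw [PySem.List.foldl_if_eq_foldl_filter, List.filter_map, PySem.List.foldl_add]
  rw [List.map_map]
  have : ((fun p : String × Int => p.2) ∘ fun k => (k, (rc.count k : Int)))
      = fun k => ((rc.count k : Nat) : Int) := rfl
  rw [this]
  have hfc : (List.filter ((fun p : String × Int => tk.contains p.1) ∘ fun k => (k, (rc.count k : Int))) (PySem.Set.ofList rc))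
      = (PySem.Set.ofList rc).filter (fun c => tk.contains c) := rfl
  rw [hfc, pv_hits_eq]
  by_cases h : rc = []
  · simp [h]
  · rw [if_neg h, pv_fold_shift]; ring
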